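-- pv_equiv track=rewrite | github.com/PierreSavatte/adventofcode | day6/part1.py | compute_new_generation
-- ===== SOURCE A (Python) =====
-- def compute_new_generation(old_generation):
--     new_generation = []
--     new_individuals = []
--     for individual in old_generation:
--         if individual == 0:
--             new_generation.append(6)
--             new_individuals.append(8)
--         else:
--             new_generation.append(individual - 1)
--     return [*new_generation, *new_individuals]
-- ===== SOURCE B (Python) =====
-- def compute_new_generation(old_generation):
--     # Build the result back-to-front: start from its tail (the newborn 8s),
--     # append the mapped timers while scanning the input right-to-left, then
--     # reverse once at the end.
--     rev = [8] * old_generation.count(0)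
--     for x in reversed(old_generation):
--         rev.append(6 if x == 0 else x - 1)
--     rev.reverse()
--     return rev
-- ===== Notes on version B (the rewrite author's own statement) =====
-- stated objective: alternative
-- what changed: A builds two forward accumulator lists in one pass and concatenates them; B constructs the output back-to-front: it seeds the result with the trailing 8s (count pass), scans the input right-to-left appending mapped timers, and reverses once at the end.
import Mathlib
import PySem

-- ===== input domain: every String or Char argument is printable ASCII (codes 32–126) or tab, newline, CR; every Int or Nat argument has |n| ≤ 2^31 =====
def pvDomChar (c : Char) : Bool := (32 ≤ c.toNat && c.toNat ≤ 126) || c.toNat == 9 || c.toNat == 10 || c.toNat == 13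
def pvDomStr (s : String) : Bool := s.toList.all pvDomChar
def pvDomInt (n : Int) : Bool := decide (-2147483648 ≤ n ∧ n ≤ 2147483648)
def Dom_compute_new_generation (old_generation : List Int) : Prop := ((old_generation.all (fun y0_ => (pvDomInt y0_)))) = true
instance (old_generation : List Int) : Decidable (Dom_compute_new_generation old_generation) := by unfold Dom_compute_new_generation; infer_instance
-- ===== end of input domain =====

-- B builds the output back-to-front (seed the trailing 8s, scan the input right-to-left, reverse once) instead of A's forward pass with two accumulator lists; objective: alternative.

-- ===== PORT A =====
-- A's loop over old_generation carrying both accumulators (new_generation, new_individuals)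
def compute_new_generation (old_generation : List Int) : List Int :=
  let acc := old_generation.foldl
    (fun (st : List Int × List Int) individual =>
      if individual = 0 then (st.1 ++ [6], st.2 ++ [8])
      else (st.1 ++ [individual - 1], st.2))
    ([], [])
  acc.1 ++ acc.2

-- ===== PORT B =====
-- Source B: rev = [8]*count(0); for x in reversed input: rev.append(mapped x); rev.reverse()
def compute_new_generation_alt (old_generation : List Int) : List Int :=
  let rev := List.replicate (PySem.List.count old_generation 0) (8 : Int)
  let rev := old_generation.reverse.foldl
    (fun acc x => acc ++ [if x = 0 then (6 : Int) else x - 1]) rev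
  rev.reverse

-- ===== PRECONDITION & SPEC =====
def Spec_compute_new_generation (old_generation : List Int) (out : List Int) : Prop := out = compute_new_generation_alt old_generation
instance (old_generation : List Int) (out : List Int) : Decidable (Spec_compute_new_generation old_generation out) := by unfold Spec_compute_new_generation; infer_instance

-- ===== CLAIM (what is proved, stated in full; the proofs are below) =====
def Claim_equal_compute_new_generation : Prop := ∀ (old_generation : List Int), Dom_compute_new_generation old_generation → Spec_compute_new_generation old_generation (compute_new_generation old_generation)

-- ===== LEMMAS AND PROOFS =====

-- A's loop invariant: from accumulators (g, i) the fold yields map/replicate with prefixes g, i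
theorem compute_new_generation_foldA (l : List Int) (g i : List Int) :
    (l.foldl
      (fun (st : List Int × List Int) individual =>
        if individual = 0 then (st.1 ++ [6], st.2 ++ [8])
        else (st.1 ++ [individual - 1], st.2))
      (g, i))
    = (g ++ l.map (fun x => if x = 0 then 6 else x - 1),
       i ++ List.replicate (PySem.List.count l 0) 8) := by
  induction l generalizing g i with
  | nil => simp [PySem.List.count]
  | cons x xs ih =>
    by_cases hx : x = 0
    · simp [hx, ih, PySem.List.count]
      rw [← List.replicate_succ, List.replicate_succ']
    · simp [hx, ih, PySem.List.count]

-- B's loop invariant: appending one mapped element per step is map appended to the seed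
theorem compute_new_generation_foldB (l : List Int) (a : List Int) :
    (l.foldl (fun acc x => acc ++ [if x = 0 then (6 : Int) else x - 1]) a)
    = a ++ l.map (fun x => if x = 0 then 6 else x - 1) := by
  induction l generalizing a with
  | nil => simp
  | cons x xs ih => simp [ih]

-- ===== VERDICT (by name: the statement is the Claim_ definition above) =====
theorem compute_new_generation_spec : Claim_equal_compute_new_generation := by
  intro l _
  unfold Spec_compute_new_generation compute_new_generation compute_new_generation_alt
  simp only [compute_new_generation_foldA, compute_new_generation_foldB]
  simp [List.reverse_append, List.map_reverse]
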